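-- pv_equiv track=rewrite | github.com/computer-analysis/BinUSE | src/symbolic_exe_until_libcall.py | tail_loop_occurrence
-- ===== SOURCE A (Python) =====
-- def tail_loop_occurrence(unit, trace, bound):
--     unit_len = len(unit)
--     trace_len = len(trace)
--     for i in range(bound):
--         e_idx = trace_len - i * unit_len
--         b_idx = e_idx - unit_len
--         if b_idx < 0 or trace[b_idx:e_idx] != unit:
--             return False
--     return True
-- ===== SOURCE B (Python) =====
-- def tail_loop_occurrence(unit, trace, bound):
--     total = bound * len(unit)
--     if total > len(trace):
--         return False
--     return trace[len(trace) - total:] == unit * bound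
-- ===== Notes on version B (the rewrite author's own statement) =====
-- stated objective: simpler
-- what changed: Replaces the per-iteration loop over bound slice comparisons with one arithmetic length check followed by a single comparison of the whole tail against the repeated pattern unit * bound.
import Mathlib
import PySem

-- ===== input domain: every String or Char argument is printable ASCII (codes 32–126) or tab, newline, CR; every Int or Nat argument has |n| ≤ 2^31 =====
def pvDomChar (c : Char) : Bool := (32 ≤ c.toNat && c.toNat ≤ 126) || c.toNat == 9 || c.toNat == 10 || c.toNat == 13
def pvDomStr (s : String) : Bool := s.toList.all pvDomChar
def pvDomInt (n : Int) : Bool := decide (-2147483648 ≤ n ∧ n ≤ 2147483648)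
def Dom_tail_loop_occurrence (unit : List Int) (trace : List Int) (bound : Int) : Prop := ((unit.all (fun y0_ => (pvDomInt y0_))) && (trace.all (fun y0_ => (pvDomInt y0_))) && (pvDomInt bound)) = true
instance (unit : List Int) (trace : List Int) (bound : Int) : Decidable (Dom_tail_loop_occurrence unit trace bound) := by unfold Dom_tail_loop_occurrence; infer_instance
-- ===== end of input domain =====

-- B replaces A's per-index loop of slice comparisons by one length check plus a single
-- comparison of the whole tail against the repeated pattern (objective: simpler).

-- ===== PORT A =====
-- the 'for i in range(bound)' loop with its early 'return False': i counts up from 0,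
-- the remaining iteration count bound.toNat (= len(range(bound))) is the fuel
def tail_loop_occurrence_go (unit : List Int) (trace : List Int) : Nat → Int → Bool
  | 0, _ => true
  | fuel + 1, i =>
      let e_idx := PySem.List.len trace - i * PySem.List.len unit
      let b_idx := e_idx - PySem.List.len unit
      if b_idx < 0 ∨ PySem.List.slice trace (some b_idx) (some e_idx) ≠ unit then
        false
      else
        tail_loop_occurrence_go unit trace fuel (i + 1)

def tail_loop_occurrence (unit : List Int) (trace : List Int) (bound : Int) : Bool :=
  tail_loop_occurrence_go unit trace bound.toNat 0

-- ===== PORT B =====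
-- Python's 'unit * bound' (list repetition, empty for bound ≤ 0) is ported by hand as
-- (List.replicate bound.toNat unit).flatten — exact: .toNat sends every bound ≤ 0 to 0.
def tail_loop_occurrence_alt (unit : List Int) (trace : List Int) (bound : Int) : Bool :=
  let total := bound * PySem.List.len unit
  if total > PySem.List.len trace then
    false
  else
    decide (PySem.List.slice trace (some (PySem.List.len trace - total)) none
              = (List.replicate bound.toNat unit).flatten)

-- ===== PRECONDITION & SPEC =====
def Spec_tail_loop_occurrence (unit : List Int) (trace : List Int) (bound : Int) (out : Bool) : Prop := out = tail_loop_occurrence_alt unit trace bound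
instance (unit : List Int) (trace : List Int) (bound : Int) (out : Bool) : Decidable (Spec_tail_loop_occurrence unit trace bound out) := by unfold Spec_tail_loop_occurrence; infer_instance

-- ===== CLAIM (what is proved, stated in full; the proofs are below) =====
def Claim_equal_tail_loop_occurrence : Prop := ∀ (unit : List Int) (trace : List Int) (bound : Int), Dom_tail_loop_occurrence unit trace bound → Spec_tail_loop_occurrence unit trace bound (tail_loop_occurrence unit trace bound)

-- ===== LEMMAS AND PROOFS =====

-- the body of one loop iteration (proof-side name for A's check at index i)
def chkA (unit trace : List Int) (i : Int) : Bool :=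
  if PySem.List.len trace - i * PySem.List.len unit - PySem.List.len unit < 0 ∨
      PySem.List.slice trace (some (PySem.List.len trace - i * PySem.List.len unit - PySem.List.len unit))
        (some (PySem.List.len trace - i * PySem.List.len unit)) ≠ unit then false else true

-- the loop is the conjunction of its per-index checks
lemma go_eq_all (unit trace : List Int) (n : Nat) : ∀ (i : Int),
    tail_loop_occurrence_go unit trace n i = ((List.range n).map (fun (k : Nat) => i + (k : Int))).all (chkA unit trace) := by
  induction n with
  | zero => intro i; rfl
  | succ n ih =>
      intro i
      have hr : (List.range (n + 1)).map (fun (k : Nat) => i + (k : Int)) =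
          i :: (List.range n).map (fun (k : Nat) => (i + 1) + (k : Int)) := by
        rw [List.range_succ_eq_map, List.map_cons, List.map_map]
        simp only [Nat.cast_zero, add_zero, List.cons.injEq, true_and]
        apply List.map_congr_left
        intro k _
        simp only [Function.comp_apply, Nat.cast_succ]
        ring
      rw [hr]
      by_cases h : PySem.List.len trace - i * PySem.List.len unit - PySem.List.len unit < 0 ∨
          PySem.List.slice trace (some (PySem.List.len trace - i * PySem.List.len unit - PySem.List.len unit))
            (some (PySem.List.len trace - i * PySem.List.len unit)) ≠ unit
      · simp only [tail_loop_occurrence_go, chkA, if_pos h, List.all_cons, Bool.false_and]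
      · simp only [tail_loop_occurrence_go, chkA, if_neg h, List.all_cons, Bool.true_and, ih]

-- A's check at index k, negated: the k-th chunk from the end exists and equals unit
lemma cond_not_iff (unit trace : List Int) (k : Nat) :
    (¬ ((trace.length : Int) - (k : Int) * (unit.length : Int) - (unit.length : Int) < 0 ∨
        PySem.List.slice trace
          (some ((trace.length : Int) - (k : Int) * (unit.length : Int) - (unit.length : Int)))
          (some ((trace.length : Int) - (k : Int) * (unit.length : Int))) ≠ unit)) ↔
      ((k + 1) * unit.length ≤ trace.length ∧
        (trace.drop (trace.length - (k + 1) * unit.length)).take unit.length = unit) := by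
  have hm : (k : Int) * (unit.length : Int) = ((k * unit.length : Nat) : Int) := by push_cast; ring
  have hs : (k + 1) * unit.length = k * unit.length + unit.length := by ring
  rw [hm, hs]
  generalize k * unit.length = m
  push Not
  constructor
  · rintro ⟨h1, h2⟩
    have hk : m + unit.length ≤ trace.length := by omega
    refine ⟨hk, ?_⟩
    rw [PySem.List.slice_toNat _ (by omega) (by omega)] at h2
    convert h2 using 3 <;> omega
  · rintro ⟨hk, h2⟩
    refine ⟨by omega, ?_⟩
    rw [PySem.List.slice_toNat _ (by omega) (by omega)]
    convert h2 using 3 <;> omega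

-- one check as a Bool, over the Nat index k
lemma chkA_iff (unit trace : List Int) (k : Nat) :
    chkA unit trace (k : Int) = true ↔
      ((k + 1) * unit.length ≤ trace.length ∧
        (trace.drop (trace.length - (k + 1) * unit.length)).take unit.length = unit) := by
  unfold chkA
  simp only [PySem.List.len_eq]
  split_ifs with h
  · simp only [false_iff]
    exact fun hR => absurd h (not_not.mp (fun hc => hc ((cond_not_iff unit trace k).mpr hR)))
  · simp only [true_iff]
    exact (cond_not_iff unit trace k).mp h

-- main invariant: all checks for k < n pass iff the length-(n*|unit|) tail is unit repeated n times
lemma key (unit trace : List Int) (n : Nat) :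
    (∀ k < n, (k + 1) * unit.length ≤ trace.length ∧
        (trace.drop (trace.length - (k + 1) * unit.length)).take unit.length = unit) ↔
      (n * unit.length ≤ trace.length ∧
        trace.drop (trace.length - n * unit.length) = (List.replicate n unit).flatten) := by
  induction n with
  | zero => simp
  | succ n ih =>
      have hs : (n + 1) * unit.length = n * unit.length + unit.length := by ring
      constructor
      · intro h
        have hn : ∀ k < n, (k + 1) * unit.length ≤ trace.length ∧
            (trace.drop (trace.length - (k + 1) * unit.length)).take unit.length = unit :=
          fun k hk => h k (by omega)
        obtain ⟨hle, htail⟩ := ih.mp hn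
        obtain ⟨hle', hchunk⟩ := h n (by omega)
        refine ⟨hle', ?_⟩
        have hsplit : trace.drop (trace.length - (n + 1) * unit.length) =
            (trace.drop (trace.length - (n + 1) * unit.length)).take unit.length ++
              trace.drop (trace.length - n * unit.length) := by
          conv_lhs => rw [← List.take_append_drop unit.length (trace.drop (trace.length - (n + 1) * unit.length))]
          rw [List.drop_drop]
          congr 2
          omega
        rw [hsplit, hchunk, htail, List.replicate_succ, List.flatten_cons]
      · rintro ⟨hle, htail⟩
        have hchunk : (trace.drop (trace.length - (n + 1) * unit.length)).take unit.length = unit := by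
          rw [htail, List.replicate_succ, List.flatten_cons, List.take_append_of_le_length (le_refl _),
            List.take_of_length_le (le_refl _)]
        have htail' : trace.drop (trace.length - n * unit.length) = (List.replicate n unit).flatten := by
          have hdd : trace.drop (trace.length - n * unit.length) =
              (trace.drop (trace.length - (n + 1) * unit.length)).drop unit.length := by
            rw [List.drop_drop]; congr 1; omega
          rw [hdd, htail, List.replicate_succ, List.flatten_cons, List.drop_append_of_le_length (le_refl _),
            List.drop_of_length_le (le_refl _), List.nil_append]
        intro k hk
        rcases Nat.lt_succ_iff_lt_or_eq.mp hk with hk' | hk'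
        · exact (ih.mpr ⟨by omega, htail'⟩) k hk'
        · subst hk'; exact ⟨by omega, hchunk⟩

-- A as a property of the Nat value of bound (bound ≥ 0)
lemma A_true_iff (unit trace : List Int) (n : Nat) :
    tail_loop_occurrence unit trace (n : Int) = true ↔
      (n * unit.length ≤ trace.length ∧
        trace.drop (trace.length - n * unit.length) = (List.replicate n unit).flatten) := by
  rw [← key]
  unfold tail_loop_occurrence
  rw [Int.toNat_natCast, go_eq_all]
  simp only [List.all_map, List.all_eq_true, List.mem_range, Function.comp, zero_add]
  constructor
  · intro h k hk
    exact (chkA_iff unit trace k).mp (h k hk)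
  · intro h k hk
    exact (chkA_iff unit trace k).mpr (h k hk)

-- B as the same property (bound ≥ 0)
lemma B_true_iff (unit trace : List Int) (n : Nat) :
    tail_loop_occurrence_alt unit trace (n : Int) = true ↔
      (n * unit.length ≤ trace.length ∧
        trace.drop (trace.length - n * unit.length) = (List.replicate n unit).flatten) := by
  unfold tail_loop_occurrence_alt
  simp only [PySem.List.len_eq, Int.toNat_natCast]
  have hm : (n : Int) * (unit.length : Int) = ((n * unit.length : Nat) : Int) := by push_cast; ring
  simp only [hm]
  by_cases h : ((n * unit.length : Nat) : Int) > (trace.length : Int)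
  · rw [if_pos h]
    simp only [Bool.false_eq_true, false_iff, not_and]
    intro h1 _
    omega
  · rw [if_neg h, decide_eq_true_eq]
    rw [PySem.List.slice_from _ (by omega)]
    have harg : ((trace.length : Int) - ((n * unit.length : Nat) : Int)).toNat =
        trace.length - n * unit.length := by omega
    rw [harg]
    exact ⟨fun hd => ⟨by omega, hd⟩, fun hd => hd.2⟩

lemma B_eq_A_of_nonneg (unit trace : List Int) (n : Nat) :
    tail_loop_occurrence_alt unit trace (n : Int) = tail_loop_occurrence unit trace (n : Int) := by
  rw [Bool.eq_iff_iff, B_true_iff, A_true_iff]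

lemma both_true_of_neg (unit trace : List Int) (bound : Int) (hb : bound < 0) :
    tail_loop_occurrence unit trace bound = true ∧
      tail_loop_occurrence_alt unit trace bound = true := by
  constructor
  · unfold tail_loop_occurrence
    rw [show bound.toNat = 0 from by omega]
    rfl
  · unfold tail_loop_occurrence_alt
    simp only [PySem.List.len_eq]
    have htot : bound * (unit.length : Int) ≤ 0 :=
      mul_nonpos_of_nonpos_of_nonneg (le_of_lt hb) (by positivity)
    rw [if_neg (by omega), show bound.toNat = 0 from by omega, decide_eq_true_eq]
    rw [PySem.List.slice_from _ (by omega)]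
    simp only [List.replicate_zero, List.flatten_nil]
    rw [List.drop_eq_nil_iff]
    omega

-- ===== VERDICT (by name: the statement is the Claim_ definition above) =====
theorem tail_loop_occurrence_spec : Claim_equal_tail_loop_occurrence := by
  intro unit trace bound _
  unfold Spec_tail_loop_occurrence
  rcases lt_or_ge bound 0 with hb | hb
  · obtain ⟨h1, h2⟩ := both_true_of_neg unit trace bound hb
    rw [h1, h2]
  · obtain ⟨n, rfl⟩ := Int.eq_ofNat_of_zero_le hb
    exact (B_eq_A_of_nonneg unit trace n).symm
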